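-- pv_equiv track=rewrite | github.com/qiewi/sismul | image-compression/image-compression.py | encode_ac
-- ===== SOURCE A (Python) =====
-- def encode_ac(ac_components):
--     encoded = []
--     i = 0
--     while i < len(ac_components):
--         if ac_components[i] == 0:
--             zero_count = 0
--             while i < len(ac_components) and ac_components[i] == 0:
--                 zero_count += 1
--                 i += 1
--
--             while zero_count > 15:
--                 encoded.extend([15, 0])
--                 zero_count -= 15
--
--             if zero_count > 0 and i < len(ac_components):
--                 encoded.extend([zero_count, ac_components[i]])
--                 i += 1
--             elif zero_count > 0:
--                 encoded.extend([zero_count, 0])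
--         else:
--             encoded.extend([0, ac_components[i]])
--             i += 1
--     return encoded
-- ===== SOURCE B (Python) =====
-- def encode_ac(ac_components):
--     encoded = []
--     zero_count = 0
--     for x in ac_components:
--         if x == 0:
--             zero_count += 1
--             if zero_count == 16:
--                 encoded += [15, 0]
--                 zero_count = 1
--         else:
--             encoded += [zero_count, x]
--             zero_count = 0
--     if zero_count > 0:
--         encoded += [zero_count, 0]
--     return encoded
-- ===== Notes on version B (the rewrite author's own statement) =====
-- stated objective: simpler
-- what changed: Replaced A's index-driven outer while with an inner zero-counting while and a separate ZRL-flush while by a single flat pass carrying a running zero-count accumulator that flushes a ZRL pair the moment the count reaches sixteen and emits the pending count with each nonzero.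
import Mathlib
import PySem

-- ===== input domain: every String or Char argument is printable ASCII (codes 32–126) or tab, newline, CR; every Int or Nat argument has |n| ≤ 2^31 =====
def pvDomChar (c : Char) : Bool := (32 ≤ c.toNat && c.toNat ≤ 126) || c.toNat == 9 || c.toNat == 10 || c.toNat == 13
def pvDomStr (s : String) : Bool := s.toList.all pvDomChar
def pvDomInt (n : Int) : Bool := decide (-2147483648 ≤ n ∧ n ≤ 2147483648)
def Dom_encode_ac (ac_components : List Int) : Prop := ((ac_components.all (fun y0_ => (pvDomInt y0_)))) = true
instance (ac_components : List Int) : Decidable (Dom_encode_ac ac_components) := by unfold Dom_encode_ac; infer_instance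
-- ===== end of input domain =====

-- B replaces A's three nested while-loops by one flat pass with a running zero_count accumulator (simpler); return values proved equal.

-- ===== PORT A =====
-- inner while: count leading zeros starting from accumulator z, return (final count, remaining suffix)
def countZeros : List Int → Int → Int × List Int
  | [], z => (z, [])
  | y :: t, z => if y = 0 then countZeros t (z + 1) else (z, y :: t)

-- 'while zero_count > 15: encoded.extend([15,0]); zero_count -= 15' — returns (emitted pairs, final count)
def flushZRL (z : Int) : List Int × Int :=
  if z > 15 then
    let r := flushZRL (z - 15)
    ([15, 0] ++ r.1, r.2)
  else ([], z)
termination_by z.toNat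
decreasing_by omega

-- used by the port's termination proof
theorem countZeros_snd_len : ∀ (l : List Int) (z : Int), (countZeros l z).2.length ≤ l.length := by
  intro l
  induction l with
  | nil => intro z; simp [countZeros]
  | cons y t ih =>
    intro z
    simp only [countZeros]
    split
    · exact le_trans (ih (z + 1)) (by simp)
    · simp

def encode_ac (ac_components : List Int) : List Int :=
  match ac_components with
  | [] => []
  | x :: rest =>
    if h : x = 0 then
      match hp : (countZeros (x :: rest) 0).2 with
      | [] =>
        if (flushZRL (countZeros (x :: rest) 0).1).2 > 0 then
          (flushZRL (countZeros (x :: rest) 0).1).1 ++ [(flushZRL (countZeros (x :: rest) 0).1).2, 0]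
        else (flushZRL (countZeros (x :: rest) 0).1).1
      | y :: t =>
        if (flushZRL (countZeros (x :: rest) 0).1).2 > 0 then
          (flushZRL (countZeros (x :: rest) 0).1).1 ++ [(flushZRL (countZeros (x :: rest) 0).1).2, y] ++ encode_ac t
        else
          -- unreachable: zero_count ≥ 1 after the flush loop; Python would loop forever here
          (flushZRL (countZeros (x :: rest) 0).1).1
    else [0, x] ++ encode_ac rest
termination_by ac_components.length
decreasing_by
  · have hlen := countZeros_snd_len rest (0 + 1)
    have hc : countZeros (x :: rest) 0 = countZeros rest (0 + 1) := by simp [countZeros, h]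
    rw [hc] at hp
    rw [hp] at hlen
    simp at hlen ⊢
    omega
  · simp

-- ===== PORT B =====
-- the for-loop body of Source B, state = (encoded, zero_count)
def stepB (s : List Int × Int) (x : Int) : List Int × Int :=
  if x = 0 then
    if s.2 + 1 = 16 then (s.1 ++ [15, 0], 1) else (s.1, s.2 + 1)
  else (s.1 ++ [s.2, x], 0)

def encode_ac_alt (ac_components : List Int) : List Int :=
  let r := ac_components.foldl stepB ([], 0)
  if r.2 > 0 then r.1 ++ [r.2, 0] else r.1

-- ===== PRECONDITION & SPEC =====
def Spec_encode_ac (ac_components : List Int) (out : List Int) : Prop := out = encode_ac_alt ac_components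
instance (ac_components : List Int) (out : List Int) : Decidable (Spec_encode_ac ac_components out) := by unfold Spec_encode_ac; infer_instance

-- ===== CLAIM (what is proved, stated in full; the proofs are below) =====
def Claim_equal_encode_ac : Prop := ∀ (ac_components : List Int), Dom_encode_ac ac_components → Spec_encode_ac ac_components (encode_ac ac_components)

-- ===== LEMMAS AND PROOFS =====

-- B's loop continued from pending count zc, written as structural recursion (proof intermediary)
def goB (zc : Int) : List Int → List Int
  | [] => if zc > 0 then [zc, 0] else []
  | x :: t =>
    if x = 0 then
      if zc + 1 = 16 then [15, 0] ++ goB 1 t else goB (zc + 1) t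
    else [zc, x] ++ goB 0 t

theorem foldl_stepB_goB : ∀ (l : List Int) (enc : List Int) (zc : Int),
    (if (l.foldl stepB (enc, zc)).2 > 0
      then (l.foldl stepB (enc, zc)).1 ++ [(l.foldl stepB (enc, zc)).2, 0]
      else (l.foldl stepB (enc, zc)).1) = enc ++ goB zc l := by
  intro l
  induction l with
  | nil => intro enc zc; simp [goB]; split <;> simp
  | cons x t ih =>
    intro enc zc
    simp only [List.foldl_cons, stepB, goB]
    by_cases hx : x = 0
    · rw [if_pos hx, if_pos hx]
      by_cases h16 : zc + 1 = 16
      · rw [if_pos h16, if_pos h16, ih (enc ++ [15, 0]) 1]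
        simp
      · rw [if_neg h16, if_neg h16]
        exact ih enc (zc + 1)
    · rw [if_neg hx, if_neg hx, ih (enc ++ [zc, x]) 0]
      simp

theorem encode_ac_alt_eq_goB (l : List Int) : encode_ac_alt l = goB 0 l := by
  have := foldl_stepB_goB l [] 0
  simpa [encode_ac_alt] using this

theorem countZeros_fst_ge : ∀ (l : List Int) (z : Int), z ≤ (countZeros l z).1 := by
  intro l
  induction l with
  | nil => intro z; simp [countZeros]
  | cons y t ih =>
    intro z
    simp only [countZeros]
    split
    · exact le_trans (by omega) (ih (z + 1))
    · simp

theorem countZeros_add : ∀ (l : List Int) (z c : Int),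
    countZeros l (z + c) = ((countZeros l z).1 + c, (countZeros l z).2) := by
  intro l
  induction l with
  | nil => intro z c; simp [countZeros]
  | cons y t ih =>
    intro z c
    simp only [countZeros]
    split
    · have : z + c + 1 = (z + 1) + c := by omega
      rw [this, ih (z + 1) c]
    · simp

theorem flushZRL_of_le (z : Int) (h : z ≤ 15) : flushZRL z = ([], z) := by
  rw [flushZRL]
  simp [show ¬ z > 15 by omega]

theorem flushZRL_add15 (z : Int) (h : 1 ≤ z) :
    flushZRL (z + 15) = ([15, 0] ++ (flushZRL z).1, (flushZRL z).2) := by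
  rw [flushZRL]
  simp [show z + 15 > 15 by omega]

theorem flushZRL_pos : ∀ (z : Int), 1 ≤ z → 1 ≤ (flushZRL z).2 := by
  intro z
  induction z using flushZRL.induct with
  | case1 z hz ih =>
    intro _
    rw [flushZRL, if_pos hz]
    exact ih (by omega)
  | case2 z hz =>
    intro h1
    rw [flushZRL, if_neg hz]
    exact h1

-- the core invariant: B's continued loop equals "count the zero run, flush ZRLs, emit the pair"
theorem goB_countZeros : ∀ (l : List Int) (zc : Int), 0 ≤ zc → zc < 16 →
    goB zc l =
      (flushZRL (countZeros l zc).1).1 ++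
      (match (countZeros l zc).2 with
       | [] => if (flushZRL (countZeros l zc).1).2 > 0 then [(flushZRL (countZeros l zc).1).2, 0] else []
       | y :: t => [(flushZRL (countZeros l zc).1).2, y] ++ goB 0 t) := by
  intro l
  induction l with
  | nil =>
    intro zc h0 h16
    simp [countZeros, goB, flushZRL_of_le zc (by omega)]
  | cons x t ih =>
    intro zc h0 h16
    by_cases hx : x = 0
    · have hc : countZeros (x :: t) zc = countZeros t (zc + 1) := by simp [countZeros, hx]
      rw [hc]
      by_cases h15 : zc + 1 = 16
      · have hz1 : (1 : Int) ≤ (countZeros t 1).1 := countZeros_fst_ge t 1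
        have hadd : countZeros t (zc + 1) = ((countZeros t 1).1 + 15, (countZeros t 1).2) := by
          have : zc + 1 = 1 + 15 := by omega
          rw [this, countZeros_add]
        rw [hadd]
        have hflush := flushZRL_add15 (countZeros t 1).1 hz1
        simp only [goB, if_pos hx, if_pos h15]
        rw [ih 1 (by omega) (by omega), hflush]
        simp
      · simp only [goB, if_pos hx, if_neg h15]
        exact ih (zc + 1) (by omega) (by omega)
    · have hc : countZeros (x :: t) zc = (zc, x :: t) := by simp [countZeros, hx]
      rw [hc]
      simp [goB, hx, flushZRL_of_le zc (by omega)]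

theorem encode_ac_zrun_aux (rest : List Int) : (1 : Int) ≤ (countZeros ((0:Int) :: rest) 0).1 := by
  have hc : countZeros ((0:Int) :: rest) 0 = countZeros rest (0 + 1) := by simp [countZeros]
  rw [hc]
  have := countZeros_fst_ge rest (0 + 1)
  omega

theorem countZeros_zero_cons (rest : List Int) :
    countZeros ((0:Int) :: rest) 0 = countZeros rest 1 := by
  norm_num [countZeros]

theorem goB_zero_cons (rest : List Int) : goB 0 ((0:Int) :: rest) = goB 1 rest := by
  norm_num [goB]

theorem encode_ac_eq_goB : ∀ (l : List Int), encode_ac l = goB 0 l := by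
  intro l
  induction l using encode_ac.induct with
  | case1 => simp [encode_ac, goB]
  | case2 rest hp hpos =>
    rw [encode_ac]
    simp only [dite_true]
    rw [countZeros_zero_cons] at hp hpos ⊢
    split
    next heq =>
      rw [if_pos hpos, goB_zero_cons, goB_countZeros rest 1 (by omega) (by omega), hp]
      simp [if_pos hpos]
    next y t heq =>
      simp [hp] at heq
  | case3 rest hp hneg =>
    exact absurd (flushZRL_pos _ (encode_ac_zrun_aux rest)) (by omega)
  | case4 rest y t hp hpos ih =>
    rw [encode_ac]
    simp only [dite_true]
    rw [countZeros_zero_cons] at hp hpos ⊢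
    split
    next heq =>
      simp [hp] at heq
    next y' t' heq =>
      rw [hp] at heq
      obtain ⟨hy, ht⟩ : y' = y ∧ t' = t := by
        constructor <;> injection heq <;> simp_all
      subst hy; subst ht
      rw [if_pos hpos, ih, goB_zero_cons, goB_countZeros rest 1 (by omega) (by omega), hp]
      simp
  | case5 rest y t hp hneg =>
    exact absurd (flushZRL_pos _ (encode_ac_zrun_aux rest)) (by omega)
  | case6 x rest h ih =>
    rw [encode_ac]
    simp only [dif_neg h, ih, goB, if_neg h]

-- ===== VERDICT (by name: the statement is the Claim_ definition above) =====
theorem encode_ac_spec : Claim_equal_encode_ac := by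
  intro l _
  unfold Spec_encode_ac
  rw [encode_ac_eq_goB, encode_ac_alt_eq_goB]
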